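-- pv_equiv track=rewrite | github.com/lcirvine/advent_of_code | 2023/day14.py | move_rocks
-- ===== SOURCE A (Python) =====
-- def move_rocks(current_rocks: list, max_num: int, reverse: bool = False) -> list:
--     rocks = []
--     rocks_str = ''.join(current_rocks)
--     if reverse:
--         rocks_str = rocks_str[::-1]
--     for segment in rocks_str.split('#'):
--         rocks.extend(sorted(segment, reverse=True))
--         rocks.append('#')
--     rocks = rocks[:max_num]
--     if reverse:
--         rocks = rocks[::-1]
--     return rocks
-- ===== SOURCE B (Python) =====
-- def move_rocks(current_rocks: list, max_num: int, reverse: bool = False) -> list: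
--     # Counting sort per '#'-segment in a single forward scan (no split, no comparison sort).
--     rocks_str = ''.join(current_rocks)
--     if reverse:
--         rocks_str = rocks_str[::-1]
--     out = []
--     counts = [0] * 128
--     for ch in rocks_str:
--         if ch == '#':
--             for code in range(127, -1, -1):
--                 out.extend(chr(code) * counts[code])
--             out.append('#')
--             counts = [0] * 128
--         else:
--             counts[ord(ch)] += 1
--     for code in range(127, -1, -1):
--         out.extend(chr(code) * counts[code])
--     out.append('#')
--     out = out[:max_num]
--     if reverse:
--         out = out[::-1]
--     return out
-- ===== Notes on version B (the rewrite author's own statement) =====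
-- stated objective: alternative
-- what changed: Replaces A's split('#') plus per-segment comparison sort (sorted(segment, reverse=True)) with a single forward scan that counting-sorts each '#'-segment via a 128-bucket ASCII count table, emitting buckets from high code to low at each '#'.
import Mathlib
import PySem

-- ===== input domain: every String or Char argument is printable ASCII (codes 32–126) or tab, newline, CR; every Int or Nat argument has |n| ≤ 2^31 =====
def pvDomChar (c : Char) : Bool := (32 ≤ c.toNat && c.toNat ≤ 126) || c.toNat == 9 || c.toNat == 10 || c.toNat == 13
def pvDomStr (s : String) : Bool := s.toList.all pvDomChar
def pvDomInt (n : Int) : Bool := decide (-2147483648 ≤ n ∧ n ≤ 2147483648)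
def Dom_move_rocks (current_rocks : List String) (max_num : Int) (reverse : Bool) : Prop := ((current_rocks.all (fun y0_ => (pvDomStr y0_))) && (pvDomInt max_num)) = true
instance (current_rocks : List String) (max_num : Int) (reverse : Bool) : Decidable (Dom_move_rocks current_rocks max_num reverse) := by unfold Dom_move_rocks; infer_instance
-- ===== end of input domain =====

-- B replaces A's split-then-comparison-sort with a single forward scan doing a
-- counting sort per '#'-segment (128 ASCII buckets): a different algorithm, same return value.

-- ===== PORT A =====
def move_rocks (current_rocks : List String) (max_num : Int) (reverse : Bool) : List String :=
  -- rocks_str = ''.join(current_rocks)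
  let rocks_str : List Char := PySem.Chars.join [] (current_rocks.map String.toList)
  -- if reverse: rocks_str = rocks_str[::-1]   (exact: PySem.List.slice?_none_none_neg_one)
  let rocks_str : List Char := if reverse then rocks_str.reverse else rocks_str
  -- for segment in rocks_str.split('#'): rocks.extend(sorted(segment, reverse=True)); rocks.append('#')
  let rocks : List Char :=
    (PySem.Chars.splitOn rocks_str ['#']).foldl
      (fun rocks segment => rocks ++ PySem.List.sorted segment (fun c => c) true ++ ['#']) []
  -- rocks = rocks[:max_num]
  let rocks := PySem.List.slice rocks none (some max_num)
  -- if reverse: rocks = rocks[::-1]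
  let rocks := if reverse then rocks.reverse else rocks
  rocks.map (fun c => String.ofList [c])

-- ===== PORT B =====
-- counts[ord(ch)] += 1
def pvBump (counts : List Nat) (ch : Char) : List Nat :=
  PySem.List.pySetD counts (ch.toNat : Int) (PySem.List.pyGetD counts (ch.toNat : Int) 0 + 1)

-- for code in range(127, -1, -1): out.extend(chr(code) * counts[code])
def pvFlushInto (out : List Char) (counts : List Nat) : List Char :=
  (PySem.List.pyRange 127 (-1) (-1)).foldl
    (fun out code => out ++ List.replicate (PySem.List.pyGetD counts code 0) (Char.ofNat code.toNat)) out

-- the body of Source B's `for ch in rocks_str` loop, state = (out, counts)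
def pvStepB (st : List Char × List Nat) (ch : Char) : List Char × List Nat :=
  if ch = '#' then (pvFlushInto st.1 st.2 ++ ['#'], List.replicate 128 0)
  else (st.1, pvBump st.2 ch)

def move_rocks_alt (current_rocks : List String) (max_num : Int) (reverse : Bool) : List String :=
  let rocks_str : List Char := PySem.Chars.join [] (current_rocks.map String.toList)
  let rocks_str : List Char := if reverse then rocks_str.reverse else rocks_str
  let st := rocks_str.foldl pvStepB ([], List.replicate 128 0)
  let out := pvFlushInto st.1 st.2 ++ ['#']
  let out := PySem.List.slice out none (some max_num)
  let out := if reverse then out.reverse else out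
  out.map (fun c => String.ofList [c])

-- ===== PRECONDITION & SPEC =====
def Spec_move_rocks (current_rocks : List String) (max_num : Int) (reverse : Bool) (out : List String) : Prop := out = move_rocks_alt current_rocks max_num reverse
instance (current_rocks : List String) (max_num : Int) (reverse : Bool) (out : List String) : Decidable (Spec_move_rocks current_rocks max_num reverse out) := by unfold Spec_move_rocks; infer_instance

-- ===== CLAIM (what is proved, stated in full; the proofs are below) =====
def Claim_equal_move_rocks : Prop := ∀ (current_rocks : List String) (max_num : Int) (reverse : Bool), Dom_move_rocks current_rocks max_num reverse → Spec_move_rocks current_rocks max_num reverse (move_rocks current_rocks max_num reverse)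

-- ===== LEMMAS AND PROOFS =====

-- reference splitter: Python str.split('#') written structurally
def pvMySplit (pre : List Char) : List Char → List (List Char)
  | [] => [pre]
  | c :: rest => if c = '#' then pre :: pvMySplit [] rest else pvMySplit (pre ++ [c]) rest

lemma pvGo_eq : ∀ (fuel : Nat) (l cur : List Char) (acc : List (List Char)), l.length < fuel →
    PySem.Chars.splitOn.go ['#'] fuel l cur acc = acc.reverse ++ pvMySplit cur.reverse l := by
  intro fuel
  induction fuel with
  | zero => intro l cur acc h; omega
  | succ n ih =>
    intro l cur acc h
    cases l with
    | nil => simp [PySem.Chars.splitOn.go, pvMySplit]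
    | cons c rest =>
      rw [PySem.Chars.splitOn.go]
      by_cases hc : c = '#'
      · subst hc
        have hp : List.isPrefixOf ['#'] ('#' :: rest) = true := by
          simp [List.isPrefixOf]
        rw [hp]
        simp only [if_true]
        rw [ih]
        · simp [pvMySplit]
        · simp at h ⊢; omega
      · have hp : List.isPrefixOf ['#'] (c :: rest) = false := by
          simp [List.isPrefixOf]; exact fun hh => hc hh.symm
        rw [hp]
        simp only [Bool.false_eq_true, if_false]
        rw [ih]
        · simp [pvMySplit, hc]
        · simp at h ⊢; omega

lemma pvSplitOn_eq (s : List Char) : PySem.Chars.splitOn s ['#'] = pvMySplit [] s := by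
  rw [PySem.Chars.splitOn, pvGo_eq (s.length + 1) s [] [] (by omega)]
  simp

-- the occurrence table Source B's loop maintains, and the list its flush loop emits
def pvOcc (seg : List Char) : List Nat := seg.foldl pvBump (List.replicate 128 0)

def pvFlush (counts : List Nat) : List Char :=
  (PySem.List.pyRange 127 (-1) (-1)).flatMap
    (fun code => List.replicate (PySem.List.pyGetD counts code 0) (Char.ofNat code.toNat))

lemma pvFlushInto_eq (out : List Char) (c : List Nat) : pvFlushInto out c = out ++ pvFlush c := by
  rw [pvFlushInto, pvFlush, PySem.List.foldl_append_eq_flatMap]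

lemma pvOcc_length (seg : List Char) : (pvOcc seg).length = 128 := by
  rw [pvOcc]
  have : ∀ (l : List Char) (c : List Nat), (l.foldl pvBump c).length = c.length := by
    intro l
    induction l with
    | nil => simp
    | cons a t ih => intro c; simp [List.foldl_cons, ih, pvBump]
  simp [this]

lemma pvChrMono (a b : Nat) (ha : a < 55296) (hb : b < 55296) (h : a ≤ b) :
    Char.ofNat a ≤ Char.ofNat b := by
  have h1 : (Char.ofNat a).toNat = a := by
    rw [Char.toNat_ofNat]; simp [Nat.isValidChar]; omega
  have h2 : (Char.ofNat b).toNat = b := by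
    rw [Char.toNat_ofNat]; simp [Nat.isValidChar]; omega
  rw [Char.le_def, UInt32.le_iff_toNat_le]
  show (Char.ofNat a).toNat ≤ (Char.ofNat b).toNat
  omega

lemma pvFlush_pairwise (c : List Nat) : (pvFlush c).Pairwise (fun a b => b ≤ a) := by
  rw [pvFlush, List.pairwise_flatMap]
  constructor
  · intro k _; rw [List.pairwise_replicate]; right; rfl
  · have hp : (PySem.List.pyRange 127 (-1) (-1)).Pairwise (fun k1 k2 => k2 < k1) := by
      rw [PySem.List.pyRange_neg_one_eq_reverse, List.pairwise_reverse]
      simpa using PySem.List.pairwise_lt_pyRange_one (-1+1) (127+1)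
    have hmem : ∀ k ∈ PySem.List.pyRange 127 (-1) (-1), 0 ≤ k ∧ k ≤ 127 := by
      intro k hk
      rw [PySem.List.mem_pyRange_neg_one] at hk
      omega
    refine List.Pairwise.imp_of_mem ?_ hp
    intro k1 k2 h1 h2 hlt x hx y hy
    rw [List.mem_replicate] at hx hy
    rw [hx.2, hy.2]
    have b1 := hmem k1 h1; have b2 := hmem k2 h2
    exact pvChrMono k2.toNat k1.toNat (by omega) (by omega) (by omega)

lemma pvFlush_bump_perm (c : List Nat) (hc : c.length = 128) (ch : Char) (h : ch.toNat < 128) :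
    (pvFlush (pvBump c ch)).Perm (ch :: pvFlush c) := by
  have hk : ((ch.toNat : Int)).toNat = ch.toNat := by omega
  have hcons : PySem.List.pyRange (ch.toNat : Int) 128 = (ch.toNat : Int) :: PySem.List.pyRange ((ch.toNat : Int) + 1) 128 :=
    PySem.List.pyRange_one_cons (by omega)
  have h1 : PySem.List.pyRange 0 128 = PySem.List.pyRange 0 (ch.toNat : Int) ++ (ch.toNat : Int) :: PySem.List.pyRange ((ch.toNat : Int) + 1) 128 := by
    rw [PySem.List.pyRange_one_append 0 (ch.toNat : Int) 128 (by omega) (by omega), hcons]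
  have hksplit : PySem.List.pyRange 127 (-1) (-1)
      = (PySem.List.pyRange ((ch.toNat : Int) + 1) 128).reverse ++ (ch.toNat : Int) :: (PySem.List.pyRange 0 (ch.toNat : Int)).reverse := by
    rw [PySem.List.pyRange_neg_one_eq_reverse]
    norm_num [h1]
  have hsame : ∀ (L : List Int), (∀ j ∈ L, 0 ≤ j ∧ j.toNat ≠ ch.toNat) →
      L.flatMap (fun code => List.replicate (PySem.List.pyGetD (pvBump c ch) code 0) (Char.ofNat code.toNat))
        = L.flatMap (fun code => List.replicate (PySem.List.pyGetD c code 0) (Char.ofNat code.toNat)) := by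
    intro L hL
    apply List.flatMap_congr
    intro j hj
    obtain ⟨hj0, hjk⟩ := hL j hj
    simp only [pvBump]
    rw [← Int.toNat_of_nonneg hj0,
        PySem.List.pyGetD_pySetD_natCast c ch.toNat j.toNat _ _ (by omega), if_neg hjk]
  have hY : ∀ j ∈ (PySem.List.pyRange ((ch.toNat : Int)+1) 128).reverse, 0 ≤ j ∧ j.toNat ≠ ch.toNat := by
    intro j hj; rw [List.mem_reverse, PySem.List.mem_pyRange_one] at hj; omega
  have hX : ∀ j ∈ (PySem.List.pyRange 0 (ch.toNat : Int)).reverse, 0 ≤ j ∧ j.toNat ≠ ch.toNat := by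
    intro j hj; rw [List.mem_reverse, PySem.List.mem_pyRange_one] at hj; omega
  have hcount : PySem.List.pyGetD (pvBump c ch) (ch.toNat : Int) 0 = PySem.List.pyGetD c (ch.toNat : Int) 0 + 1 := by
    simp only [pvBump]
    rw [PySem.List.pyGetD_pySetD_natCast c ch.toNat ch.toNat _ _ (by omega), if_pos rfl]
  rw [pvFlush, pvFlush, hksplit]
  rw [List.flatMap_append, List.flatMap_append, List.flatMap_cons, List.flatMap_cons,
      hsame _ hY, hsame _ hX, hcount, List.replicate_succ, hk, Char.ofNat_toNat]
  simp

lemma pvOcc_append (l : List Char) (a : Char) : pvOcc (l ++ [a]) = pvBump (pvOcc l) a := by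
  simp [pvOcc, List.foldl_append]

set_option maxRecDepth 8192 in
lemma pvFlush_zero : pvFlush (List.replicate 128 0) = [] := by decide

lemma pvFlush_occ_perm (seg : List Char) (h : ∀ ch ∈ seg, ch.toNat < 128) :
    (pvFlush (pvOcc seg)).Perm seg := by
  induction seg using List.reverseRecOn with
  | nil => rw [show pvOcc [] = List.replicate 128 0 from rfl, pvFlush_zero]
  | append_singleton l a ih =>
    rw [pvOcc_append]
    refine ((pvFlush_bump_perm (pvOcc l) (pvOcc_length l) a (by exact h a (by simp))).trans ?_)
    refine (List.Perm.cons a (ih (by intro c hc; exact h c (by simp [hc])))).trans ?_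
    exact (List.perm_append_singleton a l).symm

lemma pvFlush_occ (seg : List Char) (h : ∀ ch ∈ seg, ch.toNat < 128) :
    pvFlush (pvOcc seg) = PySem.List.sorted seg (fun c => c) true := by
  refine List.Perm.eq_of_pairwise (le := fun a b : Char => b ≤ a)
    (fun a b _ _ h1 h2 => le_antisymm h2 h1) (pvFlush_pairwise _) ?_ ?_
  · simpa using PySem.List.sorted_pairwise_rev seg (fun c => c)
  · exact (pvFlush_occ_perm seg h).trans (PySem.List.sorted_perm seg (fun c => c) true).symm

lemma pvLoop_eq : ∀ (s pre out : List Char),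
    (∀ ch ∈ pre, ch.toNat < 128) → (∀ ch ∈ s, ch.toNat < 128) →
    pvFlushInto (s.foldl pvStepB (out, pvOcc pre)).1 (s.foldl pvStepB (out, pvOcc pre)).2 ++ ['#']
      = (pvMySplit pre s).foldl
          (fun r seg => r ++ PySem.List.sorted seg (fun c => c) true ++ ['#']) out := by
  intro s
  induction s with
  | nil =>
    intro pre out hpre _
    simp [pvMySplit, pvFlushInto_eq, pvFlush_occ pre hpre]
  | cons a t ih =>
    intro pre out hpre hs
    by_cases ha : a = '#'
    · subst ha
      rw [List.foldl_cons]
      have hstep : pvStepB (out, pvOcc pre) '#' = (pvFlushInto out (pvOcc pre) ++ ['#'], pvOcc []) := by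
        simp [pvStepB]; rfl
      rw [hstep, ih [] _ (by simp) (fun c hc => hs c (by simp [hc]))]
      simp [pvMySplit, pvFlushInto_eq, pvFlush_occ pre hpre]
    · rw [List.foldl_cons]
      have hstep : pvStepB (out, pvOcc pre) a = (out, pvOcc (pre ++ [a])) := by
        simp [pvStepB, ha, pvOcc, List.foldl_append]
      rw [hstep, ih (pre ++ [a]) _
        (by intro c hc; rcases List.mem_append.1 hc with h | h
            · exact hpre c h
            · simp at h; subst h; exact hs c (by simp))
        (fun c hc => hs c (by simp [hc]))]
      simp [pvMySplit, ha]

lemma pvIntercalate_nil (L : List (List Char)) : List.intercalate ([] : List Char) L = L.flatten := by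
  induction L with
  | nil => rfl
  | cons x t ih =>
    cases t with
    | nil => simp [List.intercalate]
    | cons y tt =>
      simp only [List.intercalate, List.intersperse] at *
      simp_all

lemma pvCore_eq (s : List Char) (hs : ∀ ch ∈ s, ch.toNat < 128) :
    pvFlushInto (s.foldl pvStepB ([], List.replicate 128 0)).1
        (s.foldl pvStepB ([], List.replicate 128 0)).2 ++ ['#']
      = (PySem.Chars.splitOn s ['#']).foldl
          (fun r seg => r ++ PySem.List.sorted seg (fun c => c) true ++ ['#']) [] := by
  rw [pvSplitOn_eq]
  have h := pvLoop_eq s [] [] (by simp) hs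
  rw [show pvOcc [] = List.replicate 128 0 from rfl] at h
  exact h

-- ===== VERDICT (by name: the statement is the Claim_ definition above) =====
theorem move_rocks_spec : Claim_equal_move_rocks := by
  intro cr m r hDom
  unfold Spec_move_rocks move_rocks move_rocks_alt
  dsimp only
  have hchars : ∀ ch ∈ (if r then (PySem.Chars.join [] (cr.map String.toList)).reverse
      else PySem.Chars.join [] (cr.map String.toList)), ch.toNat < 128 := by
    have hj : ∀ ch ∈ PySem.Chars.join [] (cr.map String.toList), ch.toNat < 128 := by
      intro ch hch
      rw [PySem.Chars.join, pvIntercalate_nil, List.mem_flatten] at hch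
      obtain ⟨l, hl, hchl⟩ := hch
      rw [List.mem_map] at hl
      obtain ⟨s', hs', rfl⟩ := hl
      unfold Dom_move_rocks at hDom
      simp only [Bool.and_eq_true, List.all_eq_true] at hDom
      have := hDom.1 s' hs'
      simp only [pvDomStr, List.all_eq_true] at this
      have := this ch hchl
      simp only [pvDomChar] at this
      simp at this
      omega
    cases r <;> simpa using hj
  rw [pvCore_eq _ hchars]
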